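-- pv_equiv track=rewrite | github.com/naist-nlp/entity-linkings | entity_linkings/dataset/utils.py | _conll_words_to_text
-- ===== SOURCE A (Python) =====
-- from typing import Any, Callable, Iterable, Iterator, Optional, Union
--
-- def _conll_words_to_text(words: Iterable[str]) -> tuple[str, list[tuple[int, int]]]:
--     text = ""
--     positions = []
--     offset = 0
--     for word in words:
--         if text:
--             text += " "
--             offset += 1
--         text += word
--         n = len(word)
--         positions.append((offset, offset + n))
--         offset += n
--     return text, positions
-- ===== SOURCE B (Python) =====
-- def _conll_words_to_text(words):
--     ws = list(words)
--     lens = [len(w) for w in ws]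
--     prefix = [0]
--     for n in lens:
--         prefix.append(prefix[-1] + n)
--     positions = [(p + i, p + i + n) for i, (p, n) in enumerate(zip(prefix, lens))]
--     return " ".join(ws), positions
-- ===== Notes on version B (the rewrite author's own statement) =====
-- stated objective: idiomatic
-- what changed: B builds the text with a single ' '.join and derives each span arithmetically from a prefix sum of word lengths plus the index as separator count, instead of A's stateful loop that grows the text and threads an offset; Pre_ excludes lists whose first word is empty and that have at least two words, where A's skip-the-separator rule and plain join place separators differently and either choice is defensible.
-- outside the precondition, e.g. on _conll_words_to_text(['', 'a']): A returns ('a', [(0, 0), (0, 1)]), B returns (' a', [(0, 0), (1, 2)]); on _conll_words_to_text(['', '']): A returns ('', [(0, 0), (0, 0)]), B returns (' ', [(0, 0), (1, 1)])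
import Mathlib
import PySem

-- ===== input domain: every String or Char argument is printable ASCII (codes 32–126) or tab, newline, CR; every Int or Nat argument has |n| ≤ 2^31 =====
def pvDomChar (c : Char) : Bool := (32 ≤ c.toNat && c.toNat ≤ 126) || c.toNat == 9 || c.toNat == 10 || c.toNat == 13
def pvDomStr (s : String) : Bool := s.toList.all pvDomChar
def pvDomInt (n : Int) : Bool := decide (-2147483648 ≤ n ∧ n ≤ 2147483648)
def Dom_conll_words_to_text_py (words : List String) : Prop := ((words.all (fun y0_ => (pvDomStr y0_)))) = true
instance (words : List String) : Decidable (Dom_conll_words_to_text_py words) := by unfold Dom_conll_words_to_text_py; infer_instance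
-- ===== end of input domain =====

-- B joins the words once and computes each span arithmetically from prefix sums of word
-- lengths (objective: idiomatic, same cost); return value only, no argument is mutated.

-- ===== PORT A =====
-- loop body of A, extracted as a named helper (state = (text, positions, offset))
def conllAStep (st : String × List (Int × Int) × Int) (word : String) :
    String × List (Int × Int) × Int :=
  let text := st.1
  let positions := st.2.1
  let offset := st.2.2
  -- if text: text += " "; offset += 1
  let to' := if text ≠ "" then (text ++ " ", offset + 1) else (text, offset)
  let text := to'.1 ++ word
  let n : Int := (PySem.Str.len word : Int)
  (text, positions ++ [(to'.2, to'.2 + n)], to'.2 + n)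

def conll_words_to_text_py (words : List String) : String × (List (Int × Int)) :=
  let r := words.foldl conllAStep ("", ([] : List (Int × Int)), (0 : Int))
  (r.1, r.2.1)

-- ===== PORT B =====
def conll_words_to_text_py_alt (words : List String) : String × (List (Int × Int)) :=
  let lens := words.map (fun w => (PySem.Str.len w : Int))
  -- the prefix-append loop is exactly a scanl over the lengths
  let prefx := List.scanl (fun a n => a + n) (0 : Int) lens
  let positions := (PySem.List.enumerate (prefx.zip lens)).map
    (fun x => (x.2.1 + x.1, x.2.1 + x.1 + x.2.2))
  (PySem.Str.join " " words, positions)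

-- ===== PRECONDITION & SPEC =====
-- Pre_ excludes lists whose first word is empty and that have at least two words: there A's
-- "separator only once the accumulated text is non-empty" rule and plain ' '.join place
-- separators differently, and either behaviour is defensible for this unspecified corner.
def Pre_conll_words_to_text_py (words : List String) : Prop :=
  ¬ (words.head? = some "" ∧ 2 ≤ words.length)
instance (words : List String) : Decidable (Pre_conll_words_to_text_py words) := by
  unfold Pre_conll_words_to_text_py; infer_instance

def pvWitness_conll_words_to_text_py : List String := ["New", "York", "City"]

def Spec_conll_words_to_text_py (words : List String) (out : String × (List (Int × Int))) : Prop := out = conll_words_to_text_py_alt words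
instance (words : List String) (out : String × (List (Int × Int))) : Decidable (Spec_conll_words_to_text_py words out) := by unfold Spec_conll_words_to_text_py; infer_instance

-- ===== CLAIM (what is proved, stated in full; the proofs are below) =====
def Claim_equal_conll_words_to_text_py : Prop := ∀ (words : List String), Dom_conll_words_to_text_py words → Pre_conll_words_to_text_py words → Spec_conll_words_to_text_py words (conll_words_to_text_py words)

-- ===== LEMMAS AND PROOFS =====

-- spans of A's loop once the text is non-empty (a separator precedes every word)
def conllPosFrom (o : Int) : List String → List (Int × Int)
  | [] => []
  | w :: l => (o + 1, o + 1 + (PySem.Str.len w : Int)) ::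
      conllPosFrom (o + 1 + (PySem.Str.len w : Int)) l

-- A's text contribution once the text is non-empty
def conllSepJoin : List String → String
  | [] => ""
  | w :: l => " " ++ w ++ conllSepJoin l

def conllSumLen (l : List String) : Int := (l.map (fun w => (PySem.Str.len w : Int))).sum

-- shape of B's position list (index i, running prefix sum a)
def conllPosGo : Nat → Int → List String → List (Int × Int)
  | _, _, [] => []
  | i, a, w :: l =>
    (a + (i : Int), a + (i : Int) + (PySem.Str.len w : Int)) ::
      conllPosGo (i + 1) (a + (PySem.Str.len w : Int)) l

theorem conll_append_space_ne (t w : String) : (t ++ " " ++ w) ≠ "" := by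
  intro h
  have := congrArg String.toList h
  simp at this

theorem conll_foldA_ne (l : List String) :
    ∀ (t : String) (p : List (Int × Int)) (o : Int), t ≠ "" →
    l.foldl conllAStep (t, p, o) =
      (t ++ conllSepJoin l, p ++ conllPosFrom o l, o + conllSumLen l + l.length) := by
  induction l with
  | nil =>
    intro t p o ht
    simp [conllSepJoin, conllPosFrom, conllSumLen]
  | cons w l ih =>
    intro t p o ht
    have hstep : conllAStep (t, p, o) w =
        (t ++ " " ++ w, p ++ [(o + 1, o + 1 + (PySem.Str.len w : Int))],
          o + 1 + (PySem.Str.len w : Int)) := by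
      simp [conllAStep, ht]
    rw [List.foldl_cons, hstep, ih _ _ _ (conll_append_space_ne t w)]
    refine Prod.ext ?_ (Prod.ext ?_ ?_)
    · simp [conllSepJoin, String.append_assoc]
    · simp [conllPosFrom]
    · simp only [conllSumLen, List.map_cons, List.sum_cons, List.length_cons]
      push_cast
      ring

theorem conll_B_pos (ws : List String) :
    ∀ (i : Nat) (a : Int),
    (PySem.List.enumerate
        ((List.scanl (fun a n => a + n) a (ws.map (fun w => (PySem.Str.len w : Int)))).zip
          (ws.map (fun w => (PySem.Str.len w : Int)))) (i : Int)).map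
      (fun x => (x.2.1 + x.1, x.2.1 + x.1 + x.2.2)) = conllPosGo i a ws := by
  induction ws with
  | nil => intro i a; simp [conllPosGo]
  | cons w ws ih =>
    intro i a
    rw [List.map_cons, List.scanl_cons, List.zip_cons_cons, PySem.List.enumerate_cons,
      List.map_cons]
    have h1 : ((i : Int) + 1) = ((i + 1 : Nat) : Int) := by push_cast; ring
    rw [h1, ih (i + 1) (a + (PySem.Str.len w : Int))]
    simp [conllPosGo]

theorem conll_posGo_ge (l : List String) :
    ∀ (i : Nat) (a o : Int), 1 ≤ i → o = a + (i : Int) - 1 →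
    conllPosGo i a l = conllPosFrom o l := by
  induction l with
  | nil => intro i a o _ _; simp [conllPosGo, conllPosFrom]
  | cons w l ih =>
    intro i a o hi ho
    show (a + (i : Int), a + (i : Int) + (PySem.Str.len w : Int)) ::
        conllPosGo (i + 1) (a + (PySem.Str.len w : Int)) l = _
    have h1 : a + (i : Int) = o + 1 := by omega
    rw [conllPosFrom, h1]
    congr 1
    exact ih (i + 1) _ _ (by omega) (by push_cast; omega)

theorem conll_alt_eq (ws : List String) :
    conll_words_to_text_py_alt ws = (PySem.Str.join " " ws, conllPosGo 0 0 ws) := by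
  have h := conll_B_pos ws 0 0
  simp only [Nat.cast_zero] at h
  simp only [conll_words_to_text_py_alt]
  rw [h]

theorem conll_join_sepJoin (l : List String) :
    ∀ (w : String), PySem.Str.join " " (w :: l) = w ++ conllSepJoin l := by
  induction l with
  | nil =>
    intro w
    apply String.toList_inj.mp
    simp [PySem.Str.toList_join, PySem.Chars.join, List.intercalate, conllSepJoin]
  | cons y l ih =>
    intro w
    apply String.toList_inj.mp
    have h2 := congrArg String.toList (ih y)
    simp only [PySem.Str.toList_join, List.map_cons, PySem.Chars.join_cons_cons] at h2 ⊢
    simp only [conllSepJoin]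
    simp at h2 ⊢
    simp [h2]

-- ===== VERDICT (by name: the statement is the Claim_ definition above) =====
theorem conll_words_to_text_py_spec : Claim_equal_conll_words_to_text_py := by
  intro words _ hpre
  show conll_words_to_text_py words = conll_words_to_text_py_alt words
  cases words with
  | nil => decide
  | cons w l =>
    by_cases hw : w = ""
    · -- Pre_ forces l = []
      subst hw
      have hl : l = [] := by
        unfold Pre_conll_words_to_text_py at hpre
        cases l with
        | nil => rfl
        | cons y l => exact absurd ⟨rfl, by simp⟩ hpre
      subst hl
      decide
    · -- first word non-empty: separators everywhere after it
      have hstep : conllAStep ("", [], 0) w =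
          (w, [((0 : Int), (PySem.Str.len w : Int))], (PySem.Str.len w : Int)) := by
        simp [conllAStep]
      have hA : conll_words_to_text_py (w :: l) =
          (w ++ conllSepJoin l,
            ((0 : Int), (PySem.Str.len w : Int)) :: conllPosFrom (PySem.Str.len w : Int) l) := by
        unfold conll_words_to_text_py
        rw [List.foldl_cons, hstep, conll_foldA_ne l w _ _ hw]
        simp
      rw [hA, conll_alt_eq]
      refine Prod.ext ?_ ?_
      · simpa using (conll_join_sepJoin l w).symm
      · show _ = conllPosGo 0 0 (w :: l)
        show _ = ((0 : Int) + ((0 : Nat) : Int), (0 : Int) + ((0 : Nat) : Int) + (PySem.Str.len w : Int)) ::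
            conllPosGo 1 (0 + (PySem.Str.len w : Int)) l
        rw [conll_posGo_ge l 1 (0 + (PySem.Str.len w : Int)) (PySem.Str.len w : Int)
          (by omega) (by push_cast; omega)]
        norm_num
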